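-- pv_equiv track=rewrite | github.com/SarkyGit/Master-IP-App | app/routes/bulk.py | _map_rows
-- ===== SOURCE A (Python) =====
-- def _map_rows(
--     columns: list[str], rows: list[list[str]], mapping: dict[str, str]
-- ) -> list[dict]:
--     mapped: list[dict] = []
--     for r in rows:
--         data = {}
--         for i, val in enumerate(r):
--             field = mapping.get(str(i))
--             if not field or field == "skip":
--                 continue
--             data[field] = val.strip()
--         mapped.append(data)
--     return mapped
-- ===== SOURCE B (Python) =====
-- def _map_rows(
--     columns: list[str], rows: list[list[str]], mapping: dict[str, str]
-- ) -> list[dict]: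
--     # Precompute the active (column index, field) pairs once, then project each row.
--     width = max(map(len, rows), default=0)
--     pairs = []
--     for i in range(width):
--         field = mapping.get(str(i))
--         if field and field != "skip":
--             pairs.append((i, field))
--     return [{f: r[i].strip() for i, f in pairs if i < len(r)} for r in rows]
-- ===== Notes on version B (the rewrite author's own statement) =====
-- stated objective: alternative
-- what changed: Instead of looking the mapping up for every cell of every row, B precomputes once the list of active (index, field) pairs over range(max row length) and then builds each row's dict by projecting the row through that list.
import Mathlib
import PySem

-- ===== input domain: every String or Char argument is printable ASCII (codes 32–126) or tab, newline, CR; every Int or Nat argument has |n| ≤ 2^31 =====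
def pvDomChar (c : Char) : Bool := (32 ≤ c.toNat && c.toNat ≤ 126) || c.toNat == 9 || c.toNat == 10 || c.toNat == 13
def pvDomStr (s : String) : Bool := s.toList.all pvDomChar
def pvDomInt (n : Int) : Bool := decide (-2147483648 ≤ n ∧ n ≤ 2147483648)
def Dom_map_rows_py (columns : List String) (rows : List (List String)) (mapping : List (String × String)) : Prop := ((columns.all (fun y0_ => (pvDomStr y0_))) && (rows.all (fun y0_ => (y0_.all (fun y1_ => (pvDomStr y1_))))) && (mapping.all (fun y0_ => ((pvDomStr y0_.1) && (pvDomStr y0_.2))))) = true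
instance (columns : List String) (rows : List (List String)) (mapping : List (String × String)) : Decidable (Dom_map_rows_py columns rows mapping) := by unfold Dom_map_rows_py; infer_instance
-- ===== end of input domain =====

-- B precomputes the active (column index, field) pairs once and projects each row through them,
-- instead of A's per-cell mapping lookup; same results, a different decomposition (not claimed faster).

-- ===== PORT A =====
-- the body of A's inner loop: field = mapping.get(str(i)); skip empty/'skip'; data[field] = val.strip()
def aRowStep (mapping : List (String × String)) (data : PySem.Dict String String) (iv : Int × String) : PySem.Dict String String :=
  match (PySem.Dict.mk mapping).get? (PySem.Int.toStr iv.1) with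
  | none => data
  | some field => if field == "" || field == "skip" then data else data.insert field (PySem.Str.strip iv.2)

def map_rows_py (columns : List String) (rows : List (List String)) (mapping : List (String × String)) : List (List (String × String)) :=
  rows.foldl (fun mapped r => mapped ++ [((PySem.List.enumerate r 0).foldl (aRowStep mapping) PySem.Dict.empty).items]) []

-- ===== PORT B =====
-- body of B's pair-building loop: field = mapping.get(str(i)); keep (i, field) if truthy and not 'skip'
def bActStep (mapping : List (String × String)) (ps : List (Nat × String)) (i : Nat) : List (Nat × String) :=
  match (PySem.Dict.mk mapping).get? (PySem.Int.toStr (i : Int)) with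
  | none => ps
  | some field => if field == "" || field == "skip" then ps else ps ++ [(i, field)]

-- the dict comprehension's body: {f: r[i].strip() for i, f in pairs if i < len(r)}
def bProject (r : List String) (d : PySem.Dict String String) (p : Nat × String) : PySem.Dict String String :=
  if p.1 < r.length then d.insert p.2 (PySem.Str.strip (r.getD p.1 "")) else d

def map_rows_py_alt (columns : List String) (rows : List (List String)) (mapping : List (String × String)) : List (List (String × String)) :=
  let width := (PySem.List.max? (rows.map List.length) (fun x => x)).getD 0
  let pairs := (List.range width).foldl (bActStep mapping) []
  rows.map (fun r => (pairs.foldl (bProject r) PySem.Dict.empty).items)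

-- ===== PRECONDITION & SPEC =====
def Spec_map_rows_py (columns : List String) (rows : List (List String)) (mapping : List (String × String)) (out : List (List (String × String))) : Prop := out = map_rows_py_alt columns rows mapping
instance (columns : List String) (rows : List (List String)) (mapping : List (String × String)) (out : List (List (String × String))) : Decidable (Spec_map_rows_py columns rows mapping out) := by unfold Spec_map_rows_py; infer_instance

-- ===== CLAIM (what is proved, stated in full; the proofs are below) =====
def Claim_equal_map_rows_py : Prop := ∀ (columns : List String) (rows : List (List String)) (mapping : List (String × String)), Dom_map_rows_py columns rows mapping → Spec_map_rows_py columns rows mapping (map_rows_py columns rows mapping)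

-- ===== LEMMAS AND PROOFS =====

-- the "active field" of column i, shared characterisation of both loops
def mact (mapping : List (String × String)) (i : Nat) : Option String :=
  match (PySem.Dict.mk mapping).get? (PySem.Int.toStr (i : Int)) with
  | none => none
  | some field => if field == "" || field == "skip" then none else some field

-- canonical per-index step both row loops reduce to
def rStep (mapping : List (String × String)) (r : List String) (d : PySem.Dict String String) (i : Nat) : PySem.Dict String String :=
  match mact mapping i with
  | none => d
  | some f => d.insert f (PySem.Str.strip (r.getD i ""))

def bPairs (mapping : List (String × String)) (n : Nat) : List (Nat × String) :=
  (List.range n).foldl (bActStep mapping) []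

theorem bPairs_succ (mapping : List (String × String)) (n : Nat) :
    bPairs mapping (n + 1) = bPairs mapping n ++ (match mact mapping n with | none => [] | some f => [(n, f)]) := by
  unfold bPairs mact
  rw [List.range_succ, List.foldl_append]
  simp only [List.foldl_cons, List.foldl_nil, bActStep]
  cases (PySem.Dict.mk mapping).get? (PySem.Int.toStr (n : Int)) with
  | none => simp
  | some f => by_cases h : (f == "" || f == "skip") = true <;> simp [h]

-- dropping pairs with index ≥ r.length: the guard makes them no-ops
theorem fold_bPairs_drop (mapping : List (String × String)) (r : List String) :
    ∀ w, r.length ≤ w → ∀ d, (bPairs mapping w).foldl (bProject r) d = (bPairs mapping r.length).foldl (bProject r) d := by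
  intro w
  induction w with
  | zero => intro h d; have : r.length = 0 := Nat.le_zero.mp h; rw [this]
  | succ w ih =>
    intro h d
    rcases Nat.lt_or_ge r.length (w + 1) with hlt | hge
    · have hle : r.length ≤ w := Nat.lt_succ_iff.mp hlt
      rw [bPairs_succ, List.foldl_append, ih hle]
      cases hm : mact mapping w
      · simp
      · simp only [List.foldl_cons, List.foldl_nil, bProject]
        have : ¬ w < r.length := Nat.not_lt.mpr hle
        simp [this]
    · have : r.length = w + 1 := Nat.le_antisymm h hge
      rw [this]

-- the kept pairs replay exactly the canonical per-index steps
theorem fold_bPairs_eq_rStep (mapping : List (String × String)) (r : List String) :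
    ∀ n, n ≤ r.length → ∀ d, (bPairs mapping n).foldl (bProject r) d = (List.range n).foldl (rStep mapping r) d := by
  intro n
  induction n with
  | zero => intro _ d; simp [bPairs]
  | succ n ih =>
    intro h d
    have hn : n ≤ r.length := Nat.le_of_succ_le h
    rw [bPairs_succ, List.foldl_append, ih hn, List.range_succ, List.foldl_append]
    simp only [List.foldl_cons, List.foldl_nil, rStep]
    cases hm : mact mapping n
    · simp
    · simp only [List.foldl_cons, List.foldl_nil, bProject]
      have : n < r.length := Nat.lt_of_lt_of_le (Nat.lt_succ_self n) h
      simp [this]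

-- A's enumerate loop is the same canonical per-index loop
theorem fold_enumerate_eq_rStep (mapping : List (String × String)) (r : List String) :
    ∀ d, (PySem.List.enumerate r 0).foldl (aRowStep mapping) d = (List.range r.length).foldl (rStep mapping r) d := by
  induction r using List.reverseRecOn with
  | nil => intro d; simp [PySem.List.enumerate]
  | append_singleton xs x ih =>
    intro d
    rw [PySem.List.enumerate_append, List.foldl_append, ih]
    have hlen : (xs ++ [x]).length = xs.length + 1 := by simp
    rw [hlen, List.range_succ, List.foldl_append]
    have hcongr : (List.range xs.length).foldl (rStep mapping (xs ++ [x])) d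
        = (List.range xs.length).foldl (rStep mapping xs) d := by
      apply PySem.List.foldl_congr_mem
      intro d' i hi
      have hi' : i < xs.length := List.mem_range.mp hi
      unfold rStep
      have : (xs ++ [x]).getD i "" = xs.getD i "" := by
        simp [List.getD, List.getElem?_append_left hi']
      rw [this]
    rw [hcongr]
    simp only [PySem.List.enumerate, List.foldl_cons, List.foldl_nil]
    unfold aRowStep rStep mact
    have hx : (xs ++ [x]).getD xs.length "" = x := by
      simp [List.getD]
    simp only [hx]
    have h0 : (0 : Int) + xs.length = (xs.length : Int) := by omega
    rw [h0]
    cases (PySem.Dict.mk mapping).get? (PySem.Int.toStr (xs.length : Int)) with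
    | none => rfl
    | some f => by_cases hf : (f == "" || f == "skip") = true <;> simp [hf]

-- the outer append-accumulator loop is a map
theorem foldl_append_map {α β : Type} (g : α → β) (xs : List α) :
    ∀ acc : List β, xs.foldl (fun a r => a ++ [g r]) acc = acc ++ xs.map g := by
  induction xs with
  | nil => intro acc; simp
  | cons x t ih => intro acc; simp [List.foldl_cons, ih]

-- ===== VERDICT (by name: the statement is the Claim_ definition above) =====
theorem map_rows_py_spec : Claim_equal_map_rows_py := by
  unfold Claim_equal_map_rows_py
  intro columns rows mapping _
  unfold Spec_map_rows_py map_rows_py map_rows_py_alt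
  rw [foldl_append_map, List.nil_append]
  apply List.map_congr_left
  intro r hr
  have hle : r.length ≤ (PySem.List.max? (rows.map List.length) (fun x => x)).getD 0 := by
    cases hm : PySem.List.max? (rows.map List.length) (fun x => x) with
    | none =>
      have : rows.map List.length = [] := (PySem.List.max?_eq_none_iff _ _).mp hm
      have : rows = [] := List.map_eq_nil_iff.mp this
      simp [this] at hr
    | some m =>
      have := PySem.List.max?_isMax hm r.length (List.mem_map_of_mem hr)
      simpa using this
  have hb : (List.range ((PySem.List.max? (rows.map List.length) (fun x => x)).getD 0)).foldl (bActStep mapping) []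
      = bPairs mapping ((PySem.List.max? (rows.map List.length) (fun x => x)).getD 0) := rfl
  rw [fold_enumerate_eq_rStep, hb, fold_bPairs_drop mapping r _ hle,
      fold_bPairs_eq_rStep mapping r r.length (Nat.le_refl _)]
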